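-- pv_equiv track=rewrite | github.com/soyukke/lean-unsolved | scripts/collatz_ifs.py | inverse_ifs_tree
-- ===== SOURCE A (Python) =====
-- def inverse_ifs_tree(root=1, max_depth=30):
--     visited = set()
--     current_level = {root}
--     visited.update(current_level)
--     depth_stats = []
--
--     for d in range(max_depth):
--         next_level = set()
--         for x in current_level:
--             y0 = 2 * x
--             if y0 not in visited:
--                 next_level.add(y0)
--             if (2 * x - 1) % 3 == 0:
--                 y1 = (2 * x - 1) // 3
--                 if y1 > 0 and y1 not in visited:
--                     next_level.add(y1)
--         visited.update(next_level)
--         current_level = next_level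
--         depth_stats.append({
--             'depth': d + 1,
--             'new_nodes': len(next_level),
--             'total': len(visited)
--         })
--     return visited, depth_stats
-- ===== SOURCE B (Python) =====
-- def _children(root, x):
--     # the two inverse-step candidates of x; a child is "already seen" iff it equals
--     # the root (every node has a unique parent), so "!= root" replaces any visited test
--     if 2 * x != root:
--         yield 2 * x
--     if (2 * x - 1) % 3 == 0:
--         y1 = (2 * x - 1) // 3
--         if y1 > 0 and y1 != root:
--             yield y1
--
--
-- def inverse_ifs_tree(root=1, max_depth=30):
--     # phase 1: the levels of the inverse tree, with no visited set
--     levels = []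
--     level = {root}
--     for _ in range(max_depth):
--         level = {y for x in level for y in _children(root, x)}
--         levels.append(level)
--     # phase 2: the union of all levels
--     visited = {root}
--     for lv in levels:
--         visited.update(lv)
--     # phase 3: the statistics, from the level sizes alone
--     depth_stats = []
--     total = 1
--     for d, lv in enumerate(levels, 1):
--         total += len(lv)
--         depth_stats.append({'depth': d, 'new_nodes': len(lv), 'total': total})
--     return visited, depth_stats
-- ===== Notes on version B (the rewrite author's own statement) =====
-- stated objective: alternative
-- what changed: B removes the visited set and its membership tests entirely: in the inverse tree every node has a unique parent, so a generated child can only have been seen before if it equals the root, and each level is built by a set comprehension with a plain '!= root' test; A's single fused loop is split into three phases (levels, union of levels, statistics from level sizes with an arithmetic running total instead of len(visited)).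
import Mathlib
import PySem

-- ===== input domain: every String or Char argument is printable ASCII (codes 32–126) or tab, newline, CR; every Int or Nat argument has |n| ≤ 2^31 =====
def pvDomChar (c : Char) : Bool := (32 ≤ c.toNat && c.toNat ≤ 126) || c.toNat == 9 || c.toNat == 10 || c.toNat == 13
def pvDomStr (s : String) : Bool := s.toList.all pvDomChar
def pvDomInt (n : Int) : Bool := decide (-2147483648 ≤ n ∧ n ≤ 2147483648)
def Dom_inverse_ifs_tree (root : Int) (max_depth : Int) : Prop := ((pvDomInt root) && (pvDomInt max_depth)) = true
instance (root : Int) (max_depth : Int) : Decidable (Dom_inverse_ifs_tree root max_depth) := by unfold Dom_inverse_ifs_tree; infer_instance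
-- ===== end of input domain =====

-- B drops A's visited-set bookkeeping entirely (each node of the inverse tree has a
-- unique parent, so a generated child was seen before iff it equals the root) and splits
-- the fused loop into three phases: levels, their union, then the statistics; objective:
-- alternative decomposition, not speed.

-- ===== PORT A =====
-- inner loop body: for x in current_level (adds y0 and maybe y1 to next_level)
def pvInnerA (_root : Int) (visited next_level : PySem.Set Int) (x : Int) : PySem.Set Int :=
  let y0 := 2 * x
  let next_level := if ¬ PySem.Set.contains visited y0 then PySem.Set.add next_level y0 else next_level
  if PySem.Int.mod (2 * x - 1) 3 = 0 then
    let y1 := PySem.Int.floordiv (2 * x - 1) 3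
    if 0 < y1 ∧ ¬ PySem.Set.contains visited y1 then PySem.Set.add next_level y1 else next_level
  else next_level

-- outer loop body: one iteration of 'for d in range(max_depth)'
def pvStepA (root : Int) (st : PySem.Set Int × PySem.Set Int × List (List (String × Int))) (d : Int) :
    PySem.Set Int × PySem.Set Int × List (List (String × Int)) :=
  let visited := st.1
  let current_level := st.2.1
  let depth_stats := st.2.2
  let next_level := current_level.foldl (pvInnerA root visited) PySem.Set.empty
  let visited := PySem.Set.update visited next_level
  let depth_stats := depth_stats ++
    [[("depth", d + 1), ("new_nodes", (PySem.Set.len next_level : Int)), ("total", (PySem.Set.len visited : Int))]]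
  (visited, next_level, depth_stats)

def inverse_ifs_tree (root : Int) (max_depth : Int) : List Int × (List (List (String × Int))) :=
  let visited : PySem.Set Int := PySem.Set.empty
  let current_level : PySem.Set Int := PySem.Set.add PySem.Set.empty root
  let visited := PySem.Set.update visited current_level
  let st := (PySem.List.pyRange 0 max_depth 1).foldl (pvStepA root) (visited, current_level, [])
  (st.1, st.2.2)

-- ===== PORT B =====
-- the generator _children(root, x) from Source B, as the list of values it yields
def pvChildrenB (root x : Int) : List Int :=
  (if 2 * x ≠ root then [2 * x] else []) ++
  (if PySem.Int.mod (2 * x - 1) 3 = 0 then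
    (if 0 < PySem.Int.floordiv (2 * x - 1) 3 ∧ PySem.Int.floordiv (2 * x - 1) 3 ≠ root
     then [PySem.Int.floordiv (2 * x - 1) 3] else [])
   else [])

-- phase 1 body: level = {y for x in level for y in _children(root, x)}; levels.append(level)
def pvLevelStep (root : Int) (st : List (List Int) × List Int) (_d : Int) : List (List Int) × List Int :=
  let level := PySem.Set.ofList (st.2.flatMap (pvChildrenB root))
  (st.1 ++ [level], level)

-- phase 3 body: one entry of the stats loop over enumerate(levels, 1)
def pvStatStep (st : List (List (String × Int)) × Int) (p : Int × List Int) :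
    List (List (String × Int)) × Int :=
  let total := st.2 + (p.2.length : Int)
  (st.1 ++ [[("depth", p.1), ("new_nodes", (p.2.length : Int)), ("total", total)]], total)

def inverse_ifs_tree_alt (root : Int) (max_depth : Int) : List Int × (List (List (String × Int))) :=
  let levels := ((PySem.List.pyRange 0 max_depth 1).foldl (pvLevelStep root) ([], PySem.Set.ofList [root])).1
  let visited := levels.foldl (fun v lv => PySem.Set.update v lv) (PySem.Set.ofList [root])
  let stats := (PySem.List.enumerate levels 1).foldl pvStatStep ([], 1)
  (visited, stats.1)

-- ===== PRECONDITION & SPEC =====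
def Spec_inverse_ifs_tree (root : Int) (max_depth : Int) (out : List Int × (List (List (String × Int)))) : Prop := out = inverse_ifs_tree_alt root max_depth
instance (root : Int) (max_depth : Int) (out : List Int × (List (List (String × Int)))) : Decidable (Spec_inverse_ifs_tree root max_depth out) := by unfold Spec_inverse_ifs_tree; infer_instance

-- ===== CLAIM (what is proved, stated in full; the proofs are below) =====
def Claim_equal_inverse_ifs_tree : Prop := ∀ (root : Int) (max_depth : Int), Dom_inverse_ifs_tree root max_depth → Spec_inverse_ifs_tree root max_depth (inverse_ifs_tree root max_depth)

-- ===== LEMMAS AND PROOFS =====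

-- the children a node x generates (y0 = 2x unless it is the root; y1 = (2x-1)//3 when integral, positive, not the root)
def pvChildren (root x : Int) : List Int :=
  (if 2 * x ≠ root then [2 * x] else []) ++
  (if PySem.Int.mod (2 * x - 1) 3 = 0 ∧ 0 < PySem.Int.floordiv (2 * x - 1) 3 ∧ PySem.Int.floordiv (2 * x - 1) 3 ≠ root
   then [PySem.Int.floordiv (2 * x - 1) 3] else [])

-- subtree levels: pvS root j x = the nodes j steps below x
def pvS (root : Int) : Nat → Int → List Int
  | 0, x => [x]
  | j + 1, x => (pvChildren root x).flatMap (pvS root j)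

def pvLvl (root : Int) (d : Nat) : List Int := pvS root d root

def pvV (root : Int) (i : Nat) : List Int := (List.range (i + 1)).flatMap (pvLvl root)

def pvStatsA (root : Int) (n : Nat) : List (List (String × Int)) :=
  (List.range n).map (fun (i : Nat) =>
    [("depth", ((i : Int)) + 1), ("new_nodes", ((pvLvl root (i + 1)).length : Int)), ("total", ((pvV root (i + 1)).length : Int))])

lemma floordiv3_spec (a q : Int) : (PySem.Int.mod a 3 = 0 ∧ PySem.Int.floordiv a 3 = q) ↔ 3 * q = a := by
  have h1 := PySem.Int.floordiv_mul_add_mod a 3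
  have h2 := PySem.Int.mod_eq_zero_iff_dvd a 3
  constructor
  · rintro ⟨hm, hq⟩; omega
  · intro h
    have hm : PySem.Int.mod a 3 = 0 := h2.2 ⟨q, by omega⟩
    constructor
    · exact hm
    · omega

lemma mem_children (root x y : Int) :
    y ∈ pvChildren root x ↔ (y = 2 * x ∧ y ≠ root) ∨ (3 * y = 2 * x - 1 ∧ 0 < y ∧ y ≠ root) := by
  unfold pvChildren
  rw [List.mem_append]
  constructor
  · intro h
    rcases h with h | h <;> split_ifs at h with hc
    · rw [List.mem_singleton] at h; exact Or.inl ⟨h, h ▸ hc⟩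
    · exact absurd h (List.not_mem_nil)
    · rw [List.mem_singleton] at h
      obtain ⟨hm, hpos, hroot⟩ := hc
      have := (floordiv3_spec (2 * x - 1) (PySem.Int.floordiv (2 * x - 1) 3)).1 ⟨hm, rfl⟩
      exact Or.inr ⟨by omega, by omega, h ▸ hroot⟩
    · exact absurd h (List.not_mem_nil)
  · intro h
    rcases h with ⟨hy, hr⟩ | ⟨hy, hpos, hr⟩
    · left; rw [if_pos (hy ▸ hr)]; exact List.mem_singleton.2 hy
    · right
      obtain ⟨hm, hq⟩ := (floordiv3_spec (2 * x - 1) y).2 hy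
      rw [if_pos ⟨hm, by omega, hq ▸ hr⟩]
      exact List.mem_singleton.2 hq.symm

lemma nodup_children (root x : Int) : (pvChildren root x).Nodup := by
  unfold pvChildren
  split_ifs with h1 h2 h3
  · refine List.Nodup.append (List.nodup_singleton _) (List.nodup_singleton _) ?_
    intro a ha hb
    rw [List.mem_singleton] at ha hb
    obtain ⟨hm, hpos, hroot⟩ := h2
    have := (floordiv3_spec (2 * x - 1) (PySem.Int.floordiv (2 * x - 1) 3)).1 ⟨hm, rfl⟩
    omega
  · simp
  · simp
  · simp

lemma parent_unique {root x x' y : Int} (h : y ∈ pvChildren root x) (h' : y ∈ pvChildren root x') : x = x' := by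
  rw [mem_children] at h h'; omega

lemma S_succ_right (root : Int) : ∀ (j : Nat) (x : Int), pvS root (j + 1) x = (pvS root j x).flatMap (pvChildren root) := by
  intro j
  induction j with
  | zero => intro x; simp [pvS]
  | succ j ih =>
    intro x
    show (pvChildren root x).flatMap (pvS root (j + 1)) = _
    calc (pvChildren root x).flatMap (pvS root (j + 1))
        = (pvChildren root x).flatMap (fun y => (pvS root j y).flatMap (pvChildren root)) :=
          List.flatMap_congr (fun y _ => ih y)
      _ = ((pvChildren root x).flatMap (pvS root j)).flatMap (pvChildren root) :=
          (List.flatMap_assoc).symm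
      _ = (pvS root (j + 1) x).flatMap (pvChildren root) := rfl

lemma lvl_succ (root : Int) (d : Nat) : pvLvl root (d + 1) = (pvLvl root d).flatMap (pvChildren root) :=
  S_succ_right root d root

lemma root_not_mem_children (root x : Int) : root ∉ pvChildren root x := by
  rw [mem_children]; omega

lemma root_not_lvl (root : Int) (d : Nat) : root ∉ pvLvl root (d + 1) := by
  rw [lvl_succ, List.mem_flatMap]
  rintro ⟨x, _, hx⟩
  exact root_not_mem_children root x hx

lemma lvl_disjoint (root : Int) : ∀ (k d : Nat), k < d → ∀ y, y ∈ pvLvl root k → y ∉ pvLvl root d := by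
  intro k
  induction k with
  | zero =>
    intro d hd y hy hy'
    have : y = root := by simpa [pvLvl, pvS] using hy
    rw [this] at hy'
    obtain ⟨d', rfl⟩ : ∃ d', d = d' + 1 := ⟨d - 1, by omega⟩
    exact root_not_lvl root d' hy'
  | succ k ih =>
    intro d hd y hy hy'
    obtain ⟨d', rfl⟩ : ∃ d', d = d' + 1 := ⟨d - 1, by omega⟩
    rw [lvl_succ, List.mem_flatMap] at hy hy'
    obtain ⟨x, hx, hcy⟩ := hy
    obtain ⟨x', hx', hcy'⟩ := hy'
    have hxx : x = x' := parent_unique hcy hcy'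
    subst hxx
    exact ih d' (by omega) x hx hx' 

lemma nodup_flatMap_children (root : Int) : ∀ (l : List Int), l.Nodup → (l.flatMap (pvChildren root)).Nodup := by
  intro l
  induction l with
  | nil => intro _; simp
  | cons x l ih =>
    intro hn
    rw [List.nodup_cons] at hn
    rw [List.flatMap_cons]
    refine List.Nodup.append (nodup_children root x) (ih hn.2) ?_
    intro y hy hy'
    rw [List.mem_flatMap] at hy'
    obtain ⟨x', hx', hcy'⟩ := hy'
    exact hn.1 ((parent_unique hy hcy') ▸ hx')

lemma nodup_lvl (root : Int) : ∀ d, (pvLvl root d).Nodup := by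
  intro d
  induction d with
  | zero => simp [pvLvl, pvS]
  | succ d ih => rw [lvl_succ]; exact nodup_flatMap_children root _ ih

lemma V_succ (root : Int) (i : Nat) : pvV root (i + 1) = pvV root i ++ pvLvl root (i + 1) := by
  unfold pvV
  rw [List.range_succ, List.flatMap_append, List.flatMap_singleton]

lemma mem_V (root : Int) (i : Nat) (y : Int) : y ∈ pvV root i ↔ ∃ k ≤ i, y ∈ pvLvl root k := by
  unfold pvV
  rw [List.mem_flatMap]
  constructor
  · rintro ⟨k, hk, hy⟩; exact ⟨k, by simpa using List.mem_range.1 hk, hy⟩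
  · rintro ⟨k, hk, hy⟩; exact ⟨k, List.mem_range.2 (by omega), hy⟩

lemma fresh_children (root : Int) (i : Nat) {x y : Int} (hx : x ∈ pvLvl root i) (hy : y ∈ pvChildren root x) :
    y ∉ pvV root i := by
  intro hmem
  obtain ⟨k, hk, hyk⟩ := (mem_V root i y).1 hmem
  have hy1 : y ∈ pvLvl root (i + 1) := by
    rw [lvl_succ, List.mem_flatMap]; exact ⟨x, hx, hy⟩
  exact lvl_disjoint root k (i + 1) (by omega) y hyk hy1

lemma innerA_step (root : Int) (visited acc : List Int) (x : Int)
    (hroot : root ∈ visited)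
    (hfresh : ∀ y ∈ pvChildren root x, y ∉ visited ∧ y ∉ acc) :
    pvInnerA root visited acc x = acc ++ pvChildren root x := by
  have hcont : ∀ (s : List Int) (z : Int), (PySem.Set.contains s z = true) ↔ z ∈ s :=
    fun s z => PySem.Set.contains_iff s z
  unfold pvInnerA pvChildren
  have h1 : (if ¬ PySem.Set.contains visited (2 * x) then PySem.Set.add acc (2 * x) else acc)
      = acc ++ (if 2 * x ≠ root then [2 * x] else []) := by
    by_cases h0 : 2 * x = root
    · rw [if_neg (by rw [not_not, hcont, h0]; exact hroot), if_neg (by omega), List.append_nil]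
    · have hy : (2 * x) ∈ pvChildren root x := (mem_children root x (2 * x)).2 (Or.inl ⟨rfl, h0⟩)
      obtain ⟨hv, ha⟩ := hfresh _ hy
      rw [if_pos (by rw [hcont]; exact hv), if_pos h0, PySem.Set.add_of_not_mem ha]
  show (if PySem.Int.mod (2 * x - 1) 3 = 0 then _ else _) = _
  by_cases hm : PySem.Int.mod (2 * x - 1) 3 = 0
  · rw [if_pos hm]
    set q := PySem.Int.floordiv (2 * x - 1) 3 with hqdef
    have hq3 : 3 * q = 2 * x - 1 := (floordiv3_spec (2 * x - 1) q).1 ⟨hm, rfl⟩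
    by_cases hcond : 0 < q ∧ q ≠ root
    · have hyq : q ∈ pvChildren root x := (mem_children root x q).2 (Or.inr ⟨hq3, hcond.1, hcond.2⟩)
      obtain ⟨hv, ha⟩ := hfresh _ hyq
      have hnotin : q ∉ acc ++ (if 2 * x ≠ root then [2 * x] else []) := by
        intro hq
        rcases List.mem_append.1 hq with hq | hq
        · exact ha hq
        · split_ifs at hq with h0
          · rw [List.mem_singleton] at hq; omega
          · exact absurd hq List.not_mem_nil
      have hcnd2 : PySem.Int.mod (2 * x - 1) 3 = 0 ∧ 0 < q ∧ q ≠ root := ⟨hm, hcond.1, hcond.2⟩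
      rw [if_pos (And.intro hcond.1 (by rw [hcont]; exact hv)), h1,
        PySem.Set.add_of_not_mem hnotin, if_pos hcnd2, List.append_assoc]
    · have hneg : ¬ (0 < q ∧ ¬ PySem.Set.contains visited q = true) := by
        intro hh
        have hqr : q = root := by by_contra hne; exact hcond ⟨hh.1, hne⟩
        exact hh.2 (by rw [hcont, hqr]; exact hroot)
      have hc2 : ¬ (PySem.Int.mod (2 * x - 1) 3 = 0 ∧ 0 < q ∧ q ≠ root) := by
        intro hh
        exact hcond ⟨hh.2.1, hh.2.2⟩
      rw [if_neg hneg, h1, if_neg hc2, List.append_nil]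
  · have hc2 : ¬ (PySem.Int.mod (2 * x - 1) 3 = 0 ∧ 0 < PySem.Int.floordiv (2 * x - 1) 3 ∧ PySem.Int.floordiv (2 * x - 1) 3 ≠ root) := by
      intro hh
      exact hm hh.1
    rw [if_neg hm, h1, if_neg hc2, List.append_nil]

-- the inner loop over one level adds exactly the children, in order
lemma innerA_eq (root : Int) (visited : List Int) (hroot : root ∈ visited) :
    ∀ (l acc : List Int),
      (∀ x ∈ l, ∀ y ∈ pvChildren root x, y ∉ visited) →
      (acc ++ l.flatMap (pvChildren root)).Nodup →
      l.foldl (pvInnerA root visited) acc = acc ++ l.flatMap (pvChildren root) := by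
  intro l
  induction l with
  | nil => intro acc _ _; simp
  | cons x l ih =>
    intro acc hfresh hnd
    rw [List.flatMap_cons] at hnd ⊢
    have hdisj := (List.nodup_append.1 hnd).2.2
    have hstep : pvInnerA root visited acc x = acc ++ pvChildren root x := by
      refine innerA_step root visited acc x hroot (fun y hy => ⟨?_, ?_⟩)
      · exact hfresh x (by simp) y hy
      · intro hacc
        exact false_of_ne (hdisj y hacc y (List.mem_append.2 (Or.inl hy)))
    rw [List.foldl_cons, hstep, ← List.append_assoc]
    exact ih (acc ++ pvChildren root x)
      (fun x' hx' y hy => hfresh x' (List.mem_cons_of_mem x hx') y hy)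
      (by rwa [List.append_assoc])
lemma stepA_eq (root : Int) (i : Nat) (d : Int) (stats : List (List (String × Int))) :
    pvStepA root (pvV root i, pvLvl root i, stats) d =
      (pvV root (i + 1), pvLvl root (i + 1),
        stats ++ [[("depth", d + 1), ("new_nodes", ((pvLvl root (i + 1)).length : Int)), ("total", ((pvV root (i + 1)).length : Int))]]) := by
  have hroot : root ∈ pvV root i := (mem_V root i root).2 ⟨0, Nat.zero_le i, by simp [pvLvl, pvS]⟩
  have hnext : (pvLvl root i).foldl (pvInnerA root (pvV root i)) PySem.Set.empty = pvLvl root (i + 1) := by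
    have := innerA_eq root (pvV root i) hroot (pvLvl root i) []
      (fun x hx y hy => fresh_children root i hx hy)
      (by rw [List.nil_append, ← lvl_succ]; exact nodup_lvl root (i + 1))
    rw [lvl_succ]
    simpa using this
  have hupd : PySem.Set.update (pvV root i) (pvLvl root (i + 1)) = pvV root (i + 1) := by
    rw [PySem.Set.update_eq_append_of_disjoint (pvV root i) (pvLvl root (i + 1))
      (nodup_lvl root (i + 1))
      (fun y hy hmem => by
        obtain ⟨k, hk, hyk⟩ := (mem_V root i y).1 hmem
        exact lvl_disjoint root k (i + 1) (by omega) y hyk hy), ← V_succ]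
  unfold pvStepA
  simp only [hnext, hupd]
  unfold PySem.Set.len
  rfl

lemma A_loop (root : Int) : ∀ (n : Nat),
    (PySem.List.pyRange 0 (n : Int) 1).foldl (pvStepA root) (pvV root 0, pvLvl root 0, []) =
      (pvV root n, pvLvl root n, pvStatsA root n) := by
  intro n
  induction n with
  | zero =>
    rw [PySem.List.pyRange_one_eq_nil (by omega)]
    rfl
  | succ n ih =>
    have hc : ((n + 1 : Nat) : Int) = (n : Int) + 1 := by push_cast; ring
    rw [hc, PySem.List.pyRange_one_succ_right (by omega), List.foldl_append, ih]
    rw [List.foldl_cons, List.foldl_nil, stepA_eq]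
    unfold pvStatsA
    rw [List.range_succ, List.map_append]
    rfl

lemma A_eq (root max_depth : Int) :
    inverse_ifs_tree root max_depth = (pvV root max_depth.toNat, pvStatsA root max_depth.toNat) := by
  unfold inverse_ifs_tree
  dsimp only
  have h0 : (PySem.Set.update (PySem.Set.empty) (PySem.Set.add PySem.Set.empty root) : List Int) = [root] := rfl
  have hV0 : pvV root 0 = [root] := by simp [pvV, pvLvl, pvS]
  have hL0 : pvLvl root 0 = [root] := rfl
  have hC0 : (PySem.Set.add PySem.Set.empty root : List Int) = [root] := rfl
  by_cases hmd : 0 < max_depth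
  · have hcast : max_depth = (max_depth.toNat : Int) := by omega
    have hinit : ((PySem.Set.update (PySem.Set.empty) (PySem.Set.add PySem.Set.empty root) : List Int),
        (PySem.Set.add PySem.Set.empty root : List Int), ([] : List (List (String × Int)))) =
        (pvV root 0, pvLvl root 0, ([] : List (List (String × Int)))) := by
      rw [h0, hC0, hV0, hL0]
    rw [hinit, hcast, A_loop root max_depth.toNat]
    rw [Int.toNat_natCast]
  · rw [PySem.List.pyRange_one_eq_nil (by omega)]
    have : max_depth.toNat = 0 := by omega
    rw [this]
    simp only [List.foldl_nil, h0, hV0]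
    rfl

-- ---- B side ----

lemma childrenB_eq (root x : Int) : pvChildrenB root x = pvChildren root x := by
  unfold pvChildrenB pvChildren
  by_cases hm : PySem.Int.mod (2 * x - 1) 3 = 0
  · by_cases hc : 0 < PySem.Int.floordiv (2 * x - 1) 3 ∧ PySem.Int.floordiv (2 * x - 1) 3 ≠ root
    · have hand : PySem.Int.mod (2 * x - 1) 3 = 0 ∧ 0 < PySem.Int.floordiv (2 * x - 1) 3 ∧ PySem.Int.floordiv (2 * x - 1) 3 ≠ root :=
        ⟨hm, hc.1, hc.2⟩
      rw [if_pos hm, if_pos hc, if_pos hand]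
    · have hneg : ¬ (PySem.Int.mod (2 * x - 1) 3 = 0 ∧ 0 < PySem.Int.floordiv (2 * x - 1) 3 ∧ PySem.Int.floordiv (2 * x - 1) 3 ≠ root) := by
        intro hh; exact hc ⟨hh.2.1, hh.2.2⟩
      rw [if_pos hm, if_neg hc, if_neg hneg]
  · have hneg : ¬ (PySem.Int.mod (2 * x - 1) 3 = 0 ∧ 0 < PySem.Int.floordiv (2 * x - 1) 3 ∧ PySem.Int.floordiv (2 * x - 1) 3 ≠ root) := by
      intro hh; exact hm hh.1
    rw [if_neg hm, if_neg hneg]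

lemma update_V (root : Int) (i : Nat) :
    PySem.Set.update (pvV root i) (pvLvl root (i + 1)) = pvV root (i + 1) := by
  rw [PySem.Set.update_eq_append_of_disjoint (pvV root i) (pvLvl root (i + 1))
    (nodup_lvl root (i + 1))
    (fun y hy hmem => by
      obtain ⟨k, hk, hyk⟩ := (mem_V root i y).1 hmem
      exact lvl_disjoint root k (i + 1) (by omega) y hyk hy), ← V_succ]

lemma B_levels (root : Int) : ∀ n : Nat,
    (PySem.List.pyRange 0 (n : Int) 1).foldl (pvLevelStep root) ([], pvLvl root 0) =
      ((List.range n).map (fun i => pvLvl root (i + 1)), pvLvl root n) := by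
  intro n
  induction n with
  | zero =>
    rw [PySem.List.pyRange_one_eq_nil (by omega), List.foldl_nil]
    rfl
  | succ n ih =>
    have hc : ((n + 1 : Nat) : Int) = (n : Int) + 1 := by push_cast; ring
    rw [hc, PySem.List.pyRange_one_succ_right (by omega), List.foldl_append, ih,
      List.foldl_cons, List.foldl_nil]
    unfold pvLevelStep
    have hlv : PySem.Set.ofList ((pvLvl root n).flatMap (pvChildrenB root)) = pvLvl root (n + 1) := by
      have : (pvLvl root n).flatMap (pvChildrenB root) = (pvLvl root n).flatMap (pvChildren root) :=
        List.flatMap_congr (fun y _ => childrenB_eq root y)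
      rw [this, ← lvl_succ]
      exact PySem.Set.ofList_eq_self_of_nodup _ (nodup_lvl root (n + 1))
    dsimp only
    rw [hlv, List.range_succ, List.map_append]
    rfl

lemma B_visited (root : Int) : ∀ n : Nat,
    ((List.range n).map (fun i => pvLvl root (i + 1))).foldl
      (fun v lv => PySem.Set.update v lv) (pvV root 0) = pvV root n := by
  intro n
  induction n with
  | zero => rfl
  | succ n ih =>
    rw [List.range_succ, List.map_append, List.foldl_append, ih]
    exact update_V root n

lemma B_stats (root : Int) : ∀ n : Nat,
    (PySem.List.enumerate ((List.range n).map (fun i => pvLvl root (i + 1))) 1).foldl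
      pvStatStep ([], 1) = (pvStatsA root n, ((pvV root n).length : Int)) := by
  intro n
  induction n with
  | zero =>
    have : pvV root 0 = [root] := by simp [pvV, pvLvl, pvS]
    rw [this]
    rfl
  | succ n ih =>
    rw [List.range_succ, List.map_append, PySem.List.enumerate_append, List.foldl_append, ih]
    have hlen : ((List.range n).map (fun i => pvLvl root (i + 1))).length = n := by
      rw [List.length_map, List.length_range]
    rw [hlen]
    show pvStatStep (pvStatsA root n, ((pvV root n).length : Int)) ((1 + (n : Int)), pvLvl root (n + 1)) = _
    unfold pvStatStep
    dsimp only
    have hV : ((pvV root n).length : Int) + ((pvLvl root (n + 1)).length : Int) = ((pvV root (n + 1)).length : Int) := by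
      rw [V_succ, List.length_append]; push_cast; ring
    have hd : (1 + (n : Int)) = (n : Int) + 1 := by ring
    have hstats : pvStatsA root (n + 1) = pvStatsA root n ++
        [[("depth", ((n : Int)) + 1), ("new_nodes", ((pvLvl root (n + 1)).length : Int)), ("total", ((pvV root (n + 1)).length : Int))]] := by
      unfold pvStatsA
      rw [List.range_succ, List.map_append]
      rfl
    rw [hV, hd, hstats]

lemma B_eq (root max_depth : Int) :
    inverse_ifs_tree_alt root max_depth = (pvV root max_depth.toNat, pvStatsA root max_depth.toNat) := by
  unfold inverse_ifs_tree_alt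
  dsimp only
  have hL0 : PySem.Set.ofList [root] = pvLvl root 0 := rfl
  have hLV : pvLvl root 0 = pvV root 0 := by simp [pvV, pvLvl, pvS]
  by_cases hmd : 0 < max_depth
  · have hcast : max_depth = (max_depth.toNat : Int) := by omega
    rw [hL0, hcast, B_levels root max_depth.toNat, hLV, B_visited root max_depth.toNat,
      B_stats root max_depth.toNat, Int.toNat_natCast]
  · have h0 : max_depth.toNat = 0 := by omega
    rw [PySem.List.pyRange_one_eq_nil (by omega), h0]
    have hV : pvV root 0 = [root] := by simp [pvV, pvLvl, pvS]
    rw [hV]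
    rfl

-- ===== VERDICT (by name: the statement is the Claim_ definition above) =====
theorem inverse_ifs_tree_spec : Claim_equal_inverse_ifs_tree := by
  intro root max_depth _
  unfold Spec_inverse_ifs_tree
  rw [A_eq, B_eq]
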